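-- pv_equiv track=rewrite | github.com/aday1/MoveMusicSaveEditor | editor.py | _pick_loopback_midi_port
-- ===== SOURCE A (Python) =====
-- from typing import List, Optional
--
-- def _pick_loopback_midi_port(port_names: list[str]) -> Optional[str]:
--     """Prefer virtual loopback ports when available."""
--     if not port_names:
--         return None
--
--     strong_tokens = [
--         "loopback midi",
--         "loopmidi",
--         "loopbe",
--         "loop be",
--         "virtual midi",
--         "rtp-midi",
--         "rtpmidi",
--     ]
--     weak_tokens = [
--         "loopback",
--         "virtual",
--         "midi loop",
--     ]
--
--     lowered = [(name, name.lower()) for name in port_names]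
--     for token in strong_tokens:
--         for original, lowered_name in lowered:
--             if token in lowered_name:
--                 return original
--     for token in weak_tokens:
--         for original, lowered_name in lowered:
--             if token in lowered_name:
--                 return original
--     return None
-- ===== SOURCE B (Python) =====
-- def _pick_loopback_midi_port(port_names: list[str]):
--     """Prefer virtual loopback ports: one pass over the ports, argmin of token rank."""
--     tokens = [
--         "loopback midi",
--         "loopmidi",
--         "loopbe",
--         "loop be",
--         "virtual midi",
--         "rtp-midi",
--         "rtpmidi",
--         "loopback",
--         "virtual",
--         "midi loop",
--     ]
--     best = None  # (rank, name); earliest port wins ties via strict '<'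
--     for name in port_names:
--         low = name.lower()
--         rank = next((i for i, t in enumerate(tokens) if t in low), None)
--         if rank is not None and (best is None or rank < best[0]):
--             best = (rank, name)
--     return best[1] if best is not None else None
-- ===== Notes on version B (the rewrite author's own statement) =====
-- stated objective: alternative
-- what changed: Replaces the two token-major nested scans (strong then weak tokens, each rescanning the whole port list) by a single port-major pass that computes each port's best token rank in one combined token list and keeps the argmin of (rank, position) with a strict comparison.
import Mathlib
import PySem

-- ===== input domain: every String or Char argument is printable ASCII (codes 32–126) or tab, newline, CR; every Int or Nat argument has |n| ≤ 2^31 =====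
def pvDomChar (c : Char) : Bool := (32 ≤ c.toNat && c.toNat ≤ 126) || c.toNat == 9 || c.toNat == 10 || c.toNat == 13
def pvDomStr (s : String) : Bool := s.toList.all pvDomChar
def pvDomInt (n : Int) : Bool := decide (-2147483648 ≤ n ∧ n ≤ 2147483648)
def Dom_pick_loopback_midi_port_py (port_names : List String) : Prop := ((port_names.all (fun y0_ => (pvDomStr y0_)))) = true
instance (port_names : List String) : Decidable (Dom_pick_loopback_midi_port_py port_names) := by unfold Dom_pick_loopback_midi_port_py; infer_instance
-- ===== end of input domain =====

-- B replaces A's two token-major nested scans by a single port-major pass keeping the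
-- argmin of (token rank, port position); same cost, different algorithm (objective: alternative).

-- ===== PORT A =====
def pvStrongTokens : List String :=
  ["loopback midi", "loopmidi", "loopbe", "loop be", "virtual midi", "rtp-midi", "rtpmidi"]

def pvWeakTokens : List String :=
  ["loopback", "virtual", "midi loop"]

-- the two 'for token in …: for original, lowered_name in lowered: …' loops
def pvFindTok (tokens : List String) (lowered : List (String × String)) : Option String :=
  tokens.findSome? (fun token =>
    (lowered.find? (fun pr => PySem.Str.isIn token pr.2)).map Prod.fst)

def pick_loopback_midi_port_py (port_names : List String) : Option String :=
  if port_names.isEmpty then none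
  else
    let lowered := port_names.map (fun name => (name, PySem.Str.lower name))
    match pvFindTok pvStrongTokens lowered with
    | some original => some original
    | none => pvFindTok pvWeakTokens lowered

-- ===== PORT B =====
def pvTokens : List String :=
  ["loopback midi", "loopmidi", "loopbe", "loop be", "virtual midi", "rtp-midi", "rtpmidi",
   "loopback", "virtual", "midi loop"]

-- rank = index of the first token contained in the lowered name (none = no match)
def pvRank (low : String) : Option Nat :=
  pvTokens.findIdx? (fun t => PySem.Str.isIn t low)

def pvBestStep (best : Option (Nat × String)) (name : String) : Option (Nat × String) :=
  match pvRank (PySem.Str.lower name) with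
  | none => best
  | some r =>
    match best with
    | none => some (r, name)
    | some (br, _) => if r < br then some (r, name) else best

def pick_loopback_midi_port_py_alt (port_names : List String) : Option String :=
  (port_names.foldl pvBestStep none).map Prod.snd

-- ===== PRECONDITION & SPEC =====
def Spec_pick_loopback_midi_port_py (port_names : List String) (out : Option String) : Prop := out = pick_loopback_midi_port_py_alt port_names
instance (port_names : List String) (out : Option String) : Decidable (Spec_pick_loopback_midi_port_py port_names out) := by unfold Spec_pick_loopback_midi_port_py; infer_instance

-- ===== CLAIM (what is proved, stated in full; the proofs are below) =====
def Claim_equal_pick_loopback_midi_port_py : Prop := ∀ (port_names : List String), Dom_pick_loopback_midi_port_py port_names → Spec_pick_loopback_midi_port_py port_names (pick_loopback_midi_port_py port_names)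

-- ===== LEMMAS AND PROOFS =====

-- B's step, generalized to an arbitrary token list and a (name, lowered) pair
def pvStepG (ts : List String) (best : Option (Nat × String)) (pr : String × String) :
    Option (Nat × String) :=
  match ts.findIdx? (fun t => PySem.Str.isIn t pr.2) with
  | none => best
  | some r =>
    match best with
    | none => some (r, pr.1)
    | some (br, _) => if r < br then some (r, pr.1) else best

lemma pvStepG_spec (best : Option (Nat × String)) (name : String) :
    pvBestStep best name = pvStepG pvTokens best (name, PySem.Str.lower name) := by
  simp [pvBestStep, pvStepG, pvRank]

lemma pvFold_nil_tokens (ps : List (String × String)) (acc : Option (Nat × String)) :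
    ps.foldl (pvStepG []) acc = acc := by
  induction ps generalizing acc with
  | nil => rfl
  | cons pr ps ih => simpa [pvStepG] using ih acc

-- once the best has rank 0, it is never replaced
lemma pvFold_keep_zero (t : String) (ts : List String)
    (ps : List (String × String)) (s : String) :
    ps.foldl (pvStepG (t :: ts)) (some (0, s)) = some (0, s) := by
  induction ps with
  | nil => rfl
  | cons pr ps ih =>
    have : pvStepG (t :: ts) (some (0, s)) pr = some (0, s) := by
      simp only [pvStepG]
      cases h : (t :: ts).findIdx? (fun tk => PySem.Str.isIn tk pr.2) with
      | none => rfl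
      | some r => simp
    simpa [this] using ih

-- if some port matches the head token t, the fold returns (0, first such port)
lemma pvFold_rank_zero (t : String) (ts : List String) :
    ∀ (ps : List (String × String)) (acc : Option (Nat × String))
      (hacc : ∀ r s, acc = some (r, s) → 0 < r)
      (q : String × String)
      (hf : ps.find? (fun pr => PySem.Str.isIn t pr.2) = some q),
      ps.foldl (pvStepG (t :: ts)) acc = some (0, q.1) := by
  intro ps
  induction ps with
  | nil => intro acc _ q hf; simp at hf
  | cons pr ps ih =>
    intro acc hacc q hf
    by_cases h : PySem.Str.isIn t pr.2 = true
    · simp only [List.find?_cons, h] at hf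
      cases hf
      have hC : PySem.Chars.isIn t.toList pr.2.toList = true := h
      have hidx : (t :: ts).findIdx? (fun tk => PySem.Str.isIn tk pr.2) = some 0 := by
        simp [List.findIdx?_cons, hC]
      have hstep : pvStepG (t :: ts) acc pr = some (0, pr.1) := by
        simp only [pvStepG, hidx]
        cases acc with
        | none => rfl
        | some b =>
          obtain ⟨br, s⟩ := b
          have : 0 < br := hacc br s rfl
          simp [this]
      simp only [List.foldl_cons, hstep]
      exact pvFold_keep_zero t ts ps pr.1
    · have h' : PySem.Str.isIn t pr.2 = false := by
        cases hh : PySem.Str.isIn t pr.2 <;> simp_all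
      have hC : PySem.Chars.isIn t.toList pr.2.toList = false := h'
      simp only [List.find?_cons, h'] at hf
      have hidx : (t :: ts).findIdx? (fun tk => PySem.Str.isIn tk pr.2)
          = ((ts.findIdx? (fun tk => PySem.Str.isIn tk pr.2)).map (· + 1)) := by
        simp [List.findIdx?_cons, hC]
      have hacc' : ∀ r s, pvStepG (t :: ts) acc pr = some (r, s) → 0 < r := by
        intro r s hr
        simp only [pvStepG, hidx] at hr
        cases hm : ts.findIdx? (fun tk => PySem.Str.isIn tk pr.2) with
        | none =>
          rw [hm] at hr
          simp only [Option.map_none] at hr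
          exact hacc r s hr
        | some m =>
          rw [hm] at hr
          simp only [Option.map_some] at hr
          cases acc with
          | none => simp at hr; omega
          | some b =>
            obtain ⟨br, s'⟩ := b
            have hbr : 0 < br := hacc br s' rfl
            by_cases hc : m + 1 < br
            · simp [hc] at hr; omega
            · simp [hc] at hr; omega
      simpa using ih (pvStepG (t :: ts) acc pr) hacc' q hf

def pvShift (o : Option (Nat × String)) : Option (Nat × String) :=
  o.map (fun p => (p.1 + 1, p.2))

-- when no port matches the head token, folding with (t :: ts) is folding with ts, ranks shifted
lemma pvFold_shift (t : String) (ts : List String) :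
    ∀ (ps : List (String × String)) (acc : Option (Nat × String))
      (h : ∀ pr ∈ ps, PySem.Str.isIn t pr.2 = false),
      ps.foldl (pvStepG (t :: ts)) (pvShift acc) = pvShift (ps.foldl (pvStepG ts) acc) := by
  intro ps
  induction ps with
  | nil => intro acc _; rfl
  | cons pr ps ih =>
    intro acc h
    have hpr := h pr (List.mem_cons_self ..)
    have hrest : ∀ pr' ∈ ps, PySem.Str.isIn t pr'.2 = false := fun pr' hm => h pr' (List.mem_cons_of_mem _ hm)
    have hstep : pvStepG (t :: ts) (pvShift acc) pr = pvShift (pvStepG ts acc pr) := by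
      simp only [pvStepG, List.findIdx?_cons, hpr]
      cases hm : ts.findIdx? (fun tk => PySem.Str.isIn tk pr.2) with
      | none => simp
      | some r =>
        cases acc with
        | none => simp [pvShift]
        | some b =>
          obtain ⟨br, s⟩ := b
          simp only [Option.map_some, pvShift]
          by_cases hc : r < br
          · simp [hc, Nat.add_lt_add_right hc 1]
          · have : ¬ r + 1 < br + 1 := by omega
            simp [hc, this]
    simp only [List.foldl_cons, hstep]
    exact ih (pvStepG ts acc pr) hrest

-- main lemma: token-major nested scan = port-major argmin fold
lemma pvMain (ts : List String) (ps : List (String × String)) :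
    ts.findSome? (fun token => (ps.find? (fun pr => PySem.Str.isIn token pr.2)).map Prod.fst)
      = (ps.foldl (pvStepG ts) none).map Prod.snd := by
  induction ts generalizing ps with
  | nil => simp [pvFold_nil_tokens]
  | cons t ts ih =>
    cases hf : ps.find? (fun pr => PySem.Str.isIn t pr.2) with
    | some q =>
      rw [List.findSome?_cons]
      have hf2 : List.find? (fun pr => PySem.Chars.isIn t.toList pr.2.toList) ps = some q := hf
      rw [pvFold_rank_zero t ts ps none (by intro r s h; simp at h) q hf]
      simp [hf2]
    | none =>
      have hnone : ∀ pr ∈ ps, PySem.Str.isIn t pr.2 = false := by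
        intro pr hm
        have := List.find?_eq_none.mp hf pr hm
        cases hh : PySem.Str.isIn t pr.2 <;> simp_all
      rw [List.findSome?_cons]
      have hsh := pvFold_shift t ts ps none hnone
      simp only [pvShift, Option.map_none] at hsh
      rw [hf]
      simp only [Option.map_none]
      rw [ih ps, hsh]
      cases ps.foldl (pvStepG ts) none with
      | none => rfl
      | some b => rfl

lemma pvAltFold : ∀ (xs : List String) (acc : Option (Nat × String)),
    (xs.map (fun n => (n, PySem.Str.lower n))).foldl (pvStepG pvTokens) acc
      = xs.foldl pvBestStep acc := by
  intro xs
  induction xs with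
  | nil => intro acc; rfl
  | cons x xs ih => intro acc; simp only [List.map_cons, List.foldl_cons, ← pvStepG_spec, ih]

-- ===== VERDICT (by name: the statement is the Claim_ definition above) =====
theorem pick_loopback_midi_port_py_spec : Claim_equal_pick_loopback_midi_port_py := by
  intro port_names _
  unfold Spec_pick_loopback_midi_port_py pick_loopback_midi_port_py pick_loopback_midi_port_py_alt
  cases port_names with
  | nil => rfl
  | cons h tl =>
    simp only [List.isEmpty_cons, Bool.false_eq_true, if_false]
    have hA : (match pvFindTok pvStrongTokens ((h :: tl).map (fun name => (name, PySem.Str.lower name))) with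
        | some original => some original
        | none => pvFindTok pvWeakTokens ((h :: tl).map (fun name => (name, PySem.Str.lower name))))
        = pvFindTok (pvStrongTokens ++ pvWeakTokens)
            ((h :: tl).map (fun name => (name, PySem.Str.lower name))) := by
      unfold pvFindTok
      rw [List.findSome?_append]
      cases pvStrongTokens.findSome? (fun token =>
        (((h :: tl).map (fun name => (name, PySem.Str.lower name))).find?
          (fun pr => PySem.Str.isIn token pr.2)).map Prod.fst) <;> rfl
    rw [hA]
    have htok : pvStrongTokens ++ pvWeakTokens = pvTokens := rfl
    rw [htok]
    unfold pvFindTok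
    rw [pvMain, pvAltFold]
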